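-- pv_equiv track=rewrite | github.com/angelafonso227/ParejasCiberseguridad | Cipher/Vigenere1.py | descifrarCuarta
-- ===== SOURCE A (Python) =====
-- def descifrarCuarta(texto, abecedario):
--     resultado = ""
--     contador = 0
--
--     for letra in texto:
--         if letra in abecedario:
--             indice = abecedario.index(letra)
--
--             if contador % 4 == 3:  # Cambiar solo la primera letra del grupo de 4
--                 nueva_posicion = (indice+10) % len(abecedario)
--                 nueva_letra = abecedario[nueva_posicion]
--             else:
--                 nueva_letra = letra
--
--             resultado += nueva_letra
--             contador += 1
--         else:
--             resultado += letra
--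
--     return resultado
-- ===== SOURCE B (Python) =====
-- def descifrarCuarta(texto, abecedario):
--     # Pass 1: letter rank (how many alphabet letters appear strictly before) per position.
--     ranks = []
--     k = 0
--     for c in texto:
--         ranks.append(k)
--         if c in abecedario:
--             k += 1
--     # Pass 2: pure positionwise map.
--     return ''.join(
--         abecedario[(abecedario.index(c) + 10) % len(abecedario)]
--         if c in abecedario and r % 4 == 3 else c
--         for c, r in zip(texto, ranks))
-- ===== Notes on version B (the rewrite author's own statement) =====
-- stated objective: alternative
-- what changed: Replaces A's single stateful loop that interleaves counting with string accumulation by a two-phase decomposition: a prefix-scan computing each position's letter rank, followed by a pure positionwise map over zip(texto, ranks).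
import Mathlib
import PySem

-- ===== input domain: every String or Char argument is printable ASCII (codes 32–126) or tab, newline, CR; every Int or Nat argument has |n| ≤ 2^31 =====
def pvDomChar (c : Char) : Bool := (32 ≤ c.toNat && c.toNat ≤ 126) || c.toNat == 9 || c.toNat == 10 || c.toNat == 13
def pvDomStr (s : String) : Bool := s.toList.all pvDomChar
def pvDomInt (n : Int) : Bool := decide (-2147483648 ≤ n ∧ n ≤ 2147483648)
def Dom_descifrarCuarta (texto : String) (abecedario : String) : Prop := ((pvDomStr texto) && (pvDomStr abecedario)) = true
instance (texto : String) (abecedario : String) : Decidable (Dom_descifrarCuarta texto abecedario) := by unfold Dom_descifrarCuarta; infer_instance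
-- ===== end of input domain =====

-- B re-decomposes A's single stateful loop into a prefix-scan of letter ranks plus a pure
-- positionwise map (objective: alternative decomposition; same asymptotic cost).

-- ===== PORT A =====
-- Single loop accumulating the result string and a letter counter, as in A.
-- 'letra in abecedario' is a one-character substring test = list membership (exact for single chars);
-- 'abecedario[nueva_posicion]' is in range (nueva_posicion < len, nonempty since letra ∈ abecedario),
-- so List.getD with an arbitrary default is exact there.
def descifrarCuarta (texto : String) (abecedario : String) : String :=
  let ab := abecedario.toList
  let step : (List Char × Nat) → Char → (List Char × Nat) := fun (res, contador) letra =>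
    if letra ∈ ab then
      let indice := (PySem.List.index? ab letra).getD 0
      let nuevaLetra :=
        if contador % 4 = 3 then ab.getD ((indice + 10) % ab.length) letra else letra
      (res ++ [nuevaLetra], contador + 1)
    else (res ++ [letra], contador)
  String.ofList (texto.toList.foldl step ([], 0)).1

-- ===== PORT B =====
-- Pass 1 of Source B: the list of letter ranks, one per position.
-- Pass 2 of Source B: a pure map over zip(texto, ranks).
def descifrarCuarta_alt (texto : String) (abecedario : String) : String :=
  let ab := abecedario.toList
  let cs := texto.toList
  let ranks := (cs.foldl (fun (p : List Nat × Nat) c =>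
    (p.1 ++ [p.2], if c ∈ ab then p.2 + 1 else p.2)) ([], 0)).1
  String.ofList ((cs.zip ranks).map (fun p =>
    if p.1 ∈ ab ∧ p.2 % 4 = 3 then
      ab.getD (((PySem.List.index? ab p.1).getD 0 + 10) % ab.length) p.1
    else p.1))

-- ===== PRECONDITION & SPEC =====
def Spec_descifrarCuarta (texto : String) (abecedario : String) (out : String) : Prop := out = descifrarCuarta_alt texto abecedario
instance (texto : String) (abecedario : String) (out : String) : Decidable (Spec_descifrarCuarta texto abecedario out) := by unfold Spec_descifrarCuarta; infer_instance

-- ===== CLAIM (what is proved, stated in full; the proofs are below) =====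
def Claim_equal_descifrarCuarta : Prop := ∀ (texto : String) (abecedario : String), Dom_descifrarCuarta texto abecedario → Spec_descifrarCuarta texto abecedario (descifrarCuarta texto abecedario)

-- ===== LEMMAS AND PROOFS =====

-- the substitution applied to a selected letter (used only by the proofs)
def pvSub (ab : List Char) (c : Char) : Char :=
  ab.getD (((PySem.List.index? ab c).getD 0 + 10) % ab.length) c

-- reference recursion: the common value of both programs
def pvAR (ab : List Char) : List Char → Nat → List Char
  | [], _ => []
  | c :: t, k =>
    if c ∈ ab then (if k % 4 = 3 then pvSub ab c else c) :: pvAR ab t (k + 1)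
    else c :: pvAR ab t k

-- ranks as a plain recursion
def pvRanks (ab : List Char) : List Char → Nat → List Nat
  | [], _ => []
  | c :: t, k => k :: pvRanks ab t (if c ∈ ab then k + 1 else k)

theorem pvA_foldl (ab : List Char) (l : List Char) (res : List Char) (k : Nat) :
    (l.foldl (fun (p : List Char × Nat) letra =>
      if letra ∈ ab then
        let indice := (PySem.List.index? ab letra).getD 0
        let nuevaLetra :=
          if p.2 % 4 = 3 then ab.getD ((indice + 10) % ab.length) letra else letra
        (p.1 ++ [nuevaLetra], p.2 + 1)
      else (p.1 ++ [letra], p.2)) (res, k)).1 = res ++ pvAR ab l k := by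
  induction l generalizing res k with
  | nil => simp [pvAR]
  | cons c t ih =>
    by_cases hc : c ∈ ab <;> by_cases hk : k % 4 = 3 <;>
      · simp only [List.foldl_cons, hc, hk, if_true, if_false]
        rw [ih]
        simp [pvAR, pvSub, hc, hk, List.append_assoc]

theorem pvRanks_foldl (ab : List Char) (l : List Char) (rs : List Nat) (k : Nat) :
    (l.foldl (fun (p : List Nat × Nat) c =>
      (p.1 ++ [p.2], if c ∈ ab then p.2 + 1 else p.2)) (rs, k)).1 = rs ++ pvRanks ab l k := by
  induction l generalizing rs k with
  | nil => simp [pvRanks]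
  | cons c t ih => simp [pvRanks, ih, List.append_assoc]

theorem pvZip_map (ab : List Char) (l : List Char) (k : Nat) :
    ((l.zip (pvRanks ab l k)).map (fun p =>
      if p.1 ∈ ab ∧ p.2 % 4 = 3 then pvSub ab p.1 else p.1)) = pvAR ab l k := by
  induction l generalizing k with
  | nil => simp [pvRanks, pvAR]
  | cons c t ih =>
    by_cases hc : c ∈ ab <;>
      by_cases hk : k % 4 = 3 <;>
      simp [pvRanks, pvAR, hc, hk, ih]

-- ===== VERDICT (by name: the statement is the Claim_ definition above) =====
theorem descifrarCuarta_spec : Claim_equal_descifrarCuarta := by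
  intro texto abecedario _
  unfold Spec_descifrarCuarta descifrarCuarta descifrarCuarta_alt
  simp only []
  rw [show (fun (x : List Char × Nat) letra =>
      match x with
      | (res, contador) =>
        if letra ∈ abecedario.toList then
          let indice := (PySem.List.index? abecedario.toList letra).getD 0
          let nuevaLetra := if contador % 4 = 3 then
            (abecedario.toList).getD ((indice + 10) % (abecedario.toList).length) letra else letra
          (res ++ [nuevaLetra], contador + 1)
        else (res ++ [letra], contador)) =
    (fun (p : List Char × Nat) letra =>
      if letra ∈ abecedario.toList then
        let indice := (PySem.List.index? abecedario.toList letra).getD 0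
        let nuevaLetra :=
          if p.2 % 4 = 3 then (abecedario.toList).getD ((indice + 10) % (abecedario.toList).length) letra
          else letra
        (p.1 ++ [nuevaLetra], p.2 + 1)
      else (p.1 ++ [letra], p.2)) from rfl]
  rw [pvA_foldl, pvRanks_foldl]
  simp only [List.nil_append]
  have h := pvZip_map abecedario.toList texto.toList 0
  simp only [pvSub] at h
  rw [h]
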